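-- pv_equiv track=rewrite | github.com/AlbertL7/IOC-Citadel | ioc_extractor/gui/app.py | _charoffsets_to_linecol
-- ===== SOURCE A (Python) =====
-- def _charoffsets_to_linecol(text, spans):
--     """Convert character offsets to Tkinter 'line.col' indices.
--
--     Runs on the background thread.  Building the index is O(N) once,
--     then each span lookup is O(1).
--     """
--     if not spans:
--         return []
--
--     # Collect all unique offsets we need
--     offsets_needed: set = set()
--     for s, e, _cat in spans:
--         offsets_needed.add(s)
--         offsets_needed.add(e)
--     sorted_offsets = sorted(offsets_needed)
--     offset_map: dict = {}
--
--     line = 1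
--     col = 0
--     oi = 0
--     length = len(text)
--     for idx in range(length + 1):
--         while oi < len(sorted_offsets) and sorted_offsets[oi] == idx:
--             offset_map[idx] = f"{line}.{col}"
--             oi += 1
--         if oi >= len(sorted_offsets):
--             break
--         if idx < length and text[idx] == "\n":
--             line += 1
--             col = 0
--         else:
--             col += 1
--
--     result = []
--     for s, e, _cat in spans:
--         s_str = offset_map.get(s)
--         e_str = offset_map.get(e)
--         if s_str and e_str:
--             result.append((s_str, e_str))
--     return result
-- ===== SOURCE B (Python) =====
-- def _conv(text, o):
--     pre = text[:o]
--     line = pre.count("\n") + 1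
--     col = o - (pre.rfind("\n") + 1)
--     return f"{line}.{col}"
--
--
-- def _charoffsets_to_linecol(text, spans):
--     if not spans:
--         return []
--     n = len(text)
--     result = []
--     for s, e, _cat in spans:
--         if 0 <= s <= n and 0 <= e <= n:
--             result.append((_conv(text, s), _conv(text, e)))
--     return result
-- ===== Notes on version B (the rewrite author's own statement) =====
-- stated objective: simpler
-- what changed: B drops A's set+sort+single-scan offset map machinery and instead filters each span by a direct 0<=offset<=len(text) range test and converts each offset independently with pre=text[:o], line=pre.count('\n')+1, col=o-(pre.rfind('\n')+1).
-- intended difference: On inputs where some span has a negative offset but another span lies entirely within [0, len(text)], A returns [] (the negative offset sticks at the head of its sorted offset list so no offset ever gets mapped), while B returns the converted in-range spans, which is clearly the intended behaviour. — e.g. on _charoffsets_to_linecol("ab\ncd", [(-1, 2, "x"), (4, 5, "y")]): A returns [], B returns [("2.1", "2.2")]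
import Mathlib
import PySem

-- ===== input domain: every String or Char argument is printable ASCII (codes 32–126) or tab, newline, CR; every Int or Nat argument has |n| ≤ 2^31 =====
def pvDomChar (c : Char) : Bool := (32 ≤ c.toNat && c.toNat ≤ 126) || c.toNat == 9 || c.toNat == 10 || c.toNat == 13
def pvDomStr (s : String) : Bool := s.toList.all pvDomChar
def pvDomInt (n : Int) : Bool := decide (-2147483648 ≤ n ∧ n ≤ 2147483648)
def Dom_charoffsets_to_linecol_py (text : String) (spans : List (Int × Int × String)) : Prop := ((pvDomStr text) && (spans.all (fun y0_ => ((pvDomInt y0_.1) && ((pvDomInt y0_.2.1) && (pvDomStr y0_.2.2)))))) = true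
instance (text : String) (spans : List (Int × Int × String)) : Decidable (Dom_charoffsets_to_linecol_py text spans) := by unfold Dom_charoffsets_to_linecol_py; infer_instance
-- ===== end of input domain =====

-- B converts each in-range span offset directly from its text prefix (count/rfind of "\n") instead of
-- A's set+sort+single-scan offset map; B is simpler, and returns the converted in-range spans even when
-- another span carries a negative offset (where A accidentally returns []) — see D_ below.

-- f"{line}.{col}" (used by both Pythons' string formatting)
def pvFmt (line col : Int) : String := String.ofList (PySem.Int.toChars line ++ '.' :: PySem.Int.toChars col)

-- ===== PORT A =====
-- the inner 'while oi < len(sorted_offsets) and sorted_offsets[oi] == idx' loop (oi = position in the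
-- remaining suffix of sorted_offsets)
def pvAWhile (idx line col : Int) (offs : List Int) (m : PySem.Dict Int String) :
    List Int × PySem.Dict Int String :=
  match offs with
  | [] => ([], m)
  | o :: rest =>
    if o = idx then pvAWhile idx line col rest (m.insert idx (pvFmt line col))
    else (o :: rest, m)

-- the 'for idx in range(length + 1)' loop; rest = text[idx:], so the loop ends when rest is exhausted
-- (idx = length was the last iteration) or breaks when all offsets are consumed
def pvALoop (rest : List Char) (idx line col : Int) (offs : List Int) (m : PySem.Dict Int String) :
    PySem.Dict Int String :=
  match pvAWhile idx line col offs m with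
  | ([], m') => m'                              -- 'if oi >= len(sorted_offsets): break'
  | (o :: t, m') =>
    match rest with
    | [] => m'
    | c :: tl =>
      if c = '\n' then pvALoop tl (idx + 1) (line + 1) 0 (o :: t) m'
      else pvALoop tl (idx + 1) line (col + 1) (o :: t) m'
termination_by structural rest

def charoffsets_to_linecol_py (text : String) (spans : List (Int × Int × String)) : List (String × String) :=
  match spans with
  | [] => []                                    -- 'if not spans: return []'
  | _ :: _ =>
    -- offsets_needed = set(); add s and e for each span; sorted_offsets = sorted(offsets_needed)
    let offsetsNeeded : PySem.Set Int :=
      spans.foldl (fun st sp => PySem.Set.add (PySem.Set.add st sp.1) sp.2.1) PySem.Set.empty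
    let sortedOffsets := PySem.List.sorted offsetsNeeded (fun x => x) false
    let m := pvALoop text.toList 0 1 0 sortedOffsets PySem.Dict.empty
    -- 'if s_str and e_str': the stored strings are f"{line}.{col}", never empty, so truthiness = present
    spans.foldl (fun acc sp =>
      match m.get? sp.1, m.get? sp.2.1 with
      | some a, some b => acc ++ [(a, b)]
      | _, _ => acc) []

-- ===== PORT B =====
-- _conv(text, o): pre = text[:o]; line = pre.count("\n") + 1; col = o - (pre.rfind("\n") + 1)
def pvConv (cs : List Char) (o : Int) : String :=
  let pre := PySem.List.slice cs none (some o)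
  pvFmt ((PySem.Chars.count pre ['\n'] : Int) + 1) (o - (PySem.Chars.rfind pre ['\n'] + 1))

def charoffsets_to_linecol_py_alt (text : String) (spans : List (Int × Int × String)) : List (String × String) :=
  match spans with
  | [] => []                                    -- 'if not spans: return []'
  | _ :: _ =>
    let cs := text.toList
    let n : Int := (cs.length : Int)
    spans.foldl (fun acc sp =>
      if 0 ≤ sp.1 ∧ sp.1 ≤ n ∧ 0 ≤ sp.2.1 ∧ sp.2.1 ≤ n then
        acc ++ [(pvConv cs sp.1, pvConv cs sp.2.1)]
      else acc) []

-- ===== PRECONDITION & SPEC =====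
-- On inputs where some span has a negative offset but another span lies entirely within [0, len(text)],
-- A returns [] (the negative offset sticks at the head of its sorted offset list, so no offset ever gets
-- mapped), while B returns the converted in-range spans, which is the intended behaviour.
def D_charoffsets_to_linecol_py (text : String) (spans : List (Int × Int × String)) : Prop :=
  (∃ sp ∈ spans, sp.1 < 0 ∨ sp.2.1 < 0) ∧
  (∃ sp ∈ spans, 0 ≤ sp.1 ∧ sp.1 ≤ (text.toList.length : Int) ∧
                 0 ≤ sp.2.1 ∧ sp.2.1 ≤ (text.toList.length : Int))
instance (text : String) (spans : List (Int × Int × String)) : Decidable (D_charoffsets_to_linecol_py text spans) := by unfold D_charoffsets_to_linecol_py; infer_instance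

def Spec_charoffsets_to_linecol_py (text : String) (spans : List (Int × Int × String)) (out : List (String × String)) : Prop := ¬ D_charoffsets_to_linecol_py text spans → out = charoffsets_to_linecol_py_alt text spans
instance (text : String) (spans : List (Int × Int × String)) (out : List (String × String)) : Decidable (Spec_charoffsets_to_linecol_py text spans out) := by unfold Spec_charoffsets_to_linecol_py; infer_instance

def pvDiffWitness_charoffsets_to_linecol_py : String × (List (Int × Int × String)) :=
  ("ab\ncd", [(-1, 2, "x"), (4, 5, "y")])
def pvDiffWitnessOut_charoffsets_to_linecol_py : (List (String × String)) × (List (String × String)) :=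
  ([], [("2.1", "2.2")])

-- ===== CLAIM (what is proved, stated in full; the proofs are below) =====
def Claim_unchanged_charoffsets_to_linecol_py : Prop := ∀ (text : String) (spans : List (Int × Int × String)), Dom_charoffsets_to_linecol_py text spans → Spec_charoffsets_to_linecol_py text spans (charoffsets_to_linecol_py text spans)
def Claim_changed_charoffsets_to_linecol_py : Prop := Dom_charoffsets_to_linecol_py (pvDiffWitness_charoffsets_to_linecol_py.1) (pvDiffWitness_charoffsets_to_linecol_py.2) ∧ D_charoffsets_to_linecol_py (pvDiffWitness_charoffsets_to_linecol_py.1) (pvDiffWitness_charoffsets_to_linecol_py.2) ∧ charoffsets_to_linecol_py (pvDiffWitness_charoffsets_to_linecol_py.1) (pvDiffWitness_charoffsets_to_linecol_py.2) = pvDiffWitnessOut_charoffsets_to_linecol_py.1 ∧ charoffsets_to_linecol_py_alt (pvDiffWitness_charoffsets_to_linecol_py.1) (pvDiffWitness_charoffsets_to_linecol_py.2) = pvDiffWitnessOut_charoffsets_to_linecol_py.2 ∧ pvDiffWitnessOut_charoffsets_to_linecol_py.1 ≠ pvDiffWitnessOut_charoffsets_to_linecol_py.2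
def Claim_exact_charoffsets_to_linecol_py : Prop := ∀ (text : String) (spans : List (Int × Int × String)), Dom_charoffsets_to_linecol_py text spans → D_charoffsets_to_linecol_py text spans → charoffsets_to_linecol_py text spans ≠ charoffsets_to_linecol_py_alt text spans

-- ===== LEMMAS AND PROOFS =====

-- (line, col) state of A's scan after consuming the given characters
def pvLC (cs : List Char) (line col : Int) : Int × Int :=
  match cs with
  | [] => (line, col)
  | c :: tl => if c = '\n' then pvLC tl (line + 1) 0 else pvLC tl line (col + 1)

theorem pvLC_append (xs ys : List Char) (l c : Int) :
    pvLC (xs ++ ys) l c = pvLC ys (pvLC xs l c).1 (pvLC xs l c).2 := by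
  induction xs generalizing l c with
  | nil => simp [pvLC]
  | cons x tl ih => simp only [List.cons_append, pvLC]; split_ifs <;> exact ih _ _

theorem pv_count_go_single (ch : Char) (s : List Char) :
    ∀ (fuel : Nat) (acc : Nat), s.length ≤ fuel →
      PySem.Chars.count.go [ch] fuel s acc = acc + s.count ch := by
  induction s with
  | nil => intro fuel acc _; cases fuel <;> simp [PySem.Chars.count.go]
  | cons h t ih =>
    intro fuel acc hf
    cases fuel with
    | zero => simp at hf
    | succ f =>
      have hpre : [ch].isPrefixOf (h :: t) = (ch == h) := by
        simp [List.isPrefixOf]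
      rw [PySem.Chars.count.go]
      rw [hpre]
      by_cases hch : ch = h
      · rw [if_pos (by simp [hch])]
        have hdrop : List.drop [ch].length (h :: t) = t := by simp
        rw [hdrop, ih f (acc + 1) (by simpa using hf)]
        rw [List.count_cons]
        simp [hch]
        omega
      · rw [if_neg (by simp [hch])]
        rw [ih f acc (by simpa using hf)]
        rw [List.count_cons]
        simp [Ne.symm hch]

theorem pv_count_single (s : List Char) (ch : Char) :
    PySem.Chars.count s [ch] = s.count ch := by
  rw [PySem.Chars.count]
  rw [if_neg (by simp)]
  rw [pv_count_go_single ch s s.length 0 le_rfl]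
  omega

theorem pv_prefix_nl_snoc (ys : List Char) (c : Char) (hc : c ≠ '\n') :
    ['\n'].isPrefixOf (ys ++ [c]) = ['\n'].isPrefixOf ys := by
  cases ys with
  | nil =>
    have hbc : ('\n' == c) = false := by simp [Ne.symm hc]
    simp [List.isPrefixOf, hbc]
  | cons h t => simp [List.isPrefixOf]

theorem pv_rfind_snoc_nl (xs : List Char) :
    PySem.Chars.rfind (xs ++ ['\n']) ['\n'] = (xs.length : Int) := by
  rw [PySem.Chars.rfind]
  have hlen : (xs ++ ['\n']).length = xs.length + 1 := by simp
  rw [hlen]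
  rw [PySem.Chars.rfind.go]
  rw [if_neg (by simp)]
  cases xs with
  | nil => simp [PySem.Chars.rfind.go, List.isPrefixOf]
  | cons h t =>
    have h1 : (h :: t).length = t.length + 1 := by simp
    rw [h1, PySem.Chars.rfind.go,
        if_pos (by rw [show t.length + 1 = (h :: t).length by simp, List.drop_left]
                   simp [List.isPrefixOf])]

theorem pv_rfind_go_snoc (xs : List Char) (c : Char) (hc : c ≠ '\n') :
    ∀ (k : Nat), k ≤ xs.length →
      PySem.Chars.rfind.go (xs ++ [c]) ['\n'] k = PySem.Chars.rfind.go xs ['\n'] k := by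
  intro k
  induction k with
  | zero =>
    intro _
    rw [PySem.Chars.rfind.go, PySem.Chars.rfind.go]
    rw [pv_prefix_nl_snoc xs c hc]
  | succ j ih =>
    intro hk
    rw [PySem.Chars.rfind.go, PySem.Chars.rfind.go]
    rw [List.drop_append_of_le_length (by omega), pv_prefix_nl_snoc _ c hc]
    split_ifs
    · rfl
    · exact ih (by omega)

theorem pv_rfind_snoc_other (xs : List Char) (c : Char) (hc : c ≠ '\n') :
    PySem.Chars.rfind (xs ++ [c]) ['\n'] = PySem.Chars.rfind xs ['\n'] := by
  rw [PySem.Chars.rfind, PySem.Chars.rfind]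
  have hlen : (xs ++ [c]).length = xs.length + 1 := by simp
  rw [hlen]
  rw [PySem.Chars.rfind.go]
  rw [if_neg (by simp)]
  exact pv_rfind_go_snoc xs c hc xs.length le_rfl

-- B's count/rfind formulas compute exactly A's scan state
theorem pvLC_eq_count_rfind (pre : List Char) :
    pvLC pre 1 0 = ((pre.count '\n' : Int) + 1,
                    (pre.length : Int) - (PySem.Chars.rfind pre ['\n'] + 1)) := by
  induction pre using List.reverseRecOn with
  | nil =>
    have hr : PySem.Chars.rfind [] ['\n'] = -1 := by decide
    simp [pvLC, hr]
  | append_singleton xs c ih =>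
    rw [pvLC_append, ih]
    by_cases hc : c = '\n'
    · subst hc
      rw [pv_rfind_snoc_nl]
      simp only [pvLC, if_pos rfl, List.count_append, List.length_append]
      refine Prod.ext ?_ ?_ <;> simp <;> push_cast <;> omega
    · rw [pv_rfind_snoc_other xs c hc]
      have hcc : List.count '\n' [c] = 0 := by simp [hc]
      simp only [pvLC, if_neg hc, List.count_append, List.length_append, hcc]
      refine Prod.ext ?_ ?_ <;> simp <;> push_cast <;> omega

theorem pvConv_eq (cs : List Char) (o : Int) (h0 : 0 ≤ o) (hn : o ≤ (cs.length : Int)) :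
    pvConv cs o = pvFmt (pvLC (cs.take o.toNat) 1 0).1 (pvLC (cs.take o.toNat) 1 0).2 := by
  unfold pvConv
  dsimp only
  rw [PySem.List.slice_to cs (b := o) h0, pvLC_eq_count_rfind, pv_count_single]
  have hlen : ((cs.take o.toNat).length : Int) = o := by
    simp [List.length_take]; omega
  rw [hlen]

-- the while loop under strict sortedness
theorem pvAWhile_no (idx l c : Int) (o : Int) (t : List Int) (m : PySem.Dict Int String)
    (h : o ≠ idx) : pvAWhile idx l c (o :: t) m = (o :: t, m) := by
  simp [pvAWhile, h]

theorem pvAWhile_yes (idx l c : Int) (t : List Int) (m : PySem.Dict Int String)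
    (ht : ∀ x ∈ t, idx < x) :
    pvAWhile idx l c (idx :: t) m = (t, m.insert idx (pvFmt l c)) := by
  cases t with
  | nil => simp [pvAWhile]
  | cons a t' =>
    have : a ≠ idx := by have := ht a (by simp); omega
    simp [pvAWhile, this]

-- unfolding equations for pvALoop (its compiled equation is not simp-safe)
theorem pvALoop_nil (idx l c : Int) (offs : List Int) (m : PySem.Dict Int String) :
    pvALoop [] idx l c offs m = (pvAWhile idx l c offs m).2 := by
  conv_lhs => rw [pvALoop]
  rcases pvAWhile idx l c offs m with ⟨os, m'⟩
  cases os <;> rfl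

theorem pvALoop_cons (ch : Char) (tl : List Char) (idx l c : Int) (offs : List Int)
    (m : PySem.Dict Int String) :
    pvALoop (ch :: tl) idx l c offs m =
      match pvAWhile idx l c offs m with
      | ([], m') => m'
      | (o :: t, m') =>
        if ch = '\n' then pvALoop tl (idx + 1) (l + 1) 0 (o :: t) m'
        else pvALoop tl (idx + 1) l (c + 1) (o :: t) m' := by
  conv_lhs => rw [pvALoop]

-- characterization of A's offset map
theorem pvALoop_get (rest : List Char) (idx l c : Int) (offs : List Int)
    (m : PySem.Dict Int String) (o : Int)
    (hs : offs.Pairwise (· < ·)) (hge : ∀ x ∈ offs, idx ≤ x) :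
    (pvALoop rest idx l c offs m).get? o =
      if o ∈ offs ∧ o ≤ idx + (rest.length : Int) then
        some (pvFmt (pvLC (rest.take (o - idx).toNat) l c).1
                    (pvLC (rest.take (o - idx).toNat) l c).2)
      else m.get? o := by
  induction rest generalizing idx l c offs m with
  | nil =>
    rw [pvALoop_nil]
    cases offs with
    | nil => simp [pvAWhile]
    | cons a t =>
      have hpc := List.pairwise_cons.mp hs
      by_cases ha : a = idx
      · subst ha
        rw [pvAWhile_yes a l c t m hpc.1]
        by_cases ho : o = a
        · subst ho
          rw [PySem.Dict.get?_insert_self]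
          rw [if_pos ⟨List.mem_cons_self, by simp⟩]
          simp [pvLC]
        · rw [PySem.Dict.get?_insert_of_ne _ _ ho, if_neg]
          rintro ⟨hmem, hle⟩
          rcases List.mem_cons.mp hmem with h | h
          · exact ho h
          · have := hpc.1 o h; simp at hle; omega
      · rw [pvAWhile_no idx l c a t m ha, if_neg]
        rintro ⟨hmem, hle⟩
        have hgt : idx < o := by
          rcases List.mem_cons.mp hmem with h | h
          · have := hge a List.mem_cons_self; omega
          · have := hpc.1 o h; have := hge a List.mem_cons_self; omega
        simp at hle; omega
  | cons ch tl ih =>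
    rw [pvALoop_cons]
    cases offs with
    | nil => simp [pvAWhile]
    | cons a t =>
      have hpc := List.pairwise_cons.mp hs
      by_cases ha : a = idx
      · subst ha
        rw [pvAWhile_yes a l c t m hpc.1]
        cases t with
        | nil =>
          dsimp only
          by_cases ho : o = a
          · subst ho
            rw [PySem.Dict.get?_insert_self,
                if_pos ⟨List.mem_cons_self, by simp; omega⟩]
            simp [pvLC]
          · rw [PySem.Dict.get?_insert_of_ne _ _ ho, if_neg]
            rintro ⟨hmem, _⟩
            simp at hmem
            exact ho hmem
        | cons b t' =>
          dsimp only
          have hge' : ∀ x ∈ b :: t', a + 1 ≤ x := fun x hx => by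
            have := hpc.1 x hx; omega
          have hs' : (b :: t').Pairwise (· < ·) := hpc.2
          by_cases hch : ch = '\n'
          · rw [if_pos hch, ih _ _ _ _ _ hs' hge']
            by_cases ho : o = a
            · subst ho
              rw [if_neg (by rintro ⟨hmem, _⟩; have := hge' o hmem; omega),
                  PySem.Dict.get?_insert_self,
                  if_pos ⟨List.mem_cons_self, by simp; omega⟩]
              simp [pvLC]
            · by_cases hmem : o ∈ b :: t'
              · have hgt : a < o := by have := hge' o hmem; omega
                have htake : ((ch :: tl).take (o - a).toNat) = ch :: tl.take (o - a - 1).toNat := by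
                  have h1 : (o - a).toNat = (o - a - 1).toNat + 1 := by omega
                  rw [h1, List.take_succ_cons]
                by_cases hle : o ≤ a + 1 + (tl.length : Int)
                · rw [if_pos ⟨hmem, hle⟩,
                      if_pos ⟨List.mem_cons_of_mem a hmem, by simp; omega⟩, htake]
                  simp [pvLC, hch]
                  have hidx : (o - (a + 1)).toNat = (o - a).toNat - 1 := by omega
                  rw [hidx]
                · rw [if_neg (by rintro ⟨_, h⟩; exact hle h),
                      PySem.Dict.get?_insert_of_ne _ _ ho,
                      if_neg (by rintro ⟨_, h⟩; simp at h; omega)]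
              · rw [if_neg (by rintro ⟨h, _⟩; exact hmem h),
                    PySem.Dict.get?_insert_of_ne _ _ ho,
                    if_neg (by rintro ⟨h, _⟩; rcases List.mem_cons.mp h with h | h
                               exacts [absurd h ho, absurd h hmem])]
          · rw [if_neg hch, ih _ _ _ _ _ hs' hge']
            by_cases ho : o = a
            · subst ho
              rw [if_neg (by rintro ⟨hmem, _⟩; have := hge' o hmem; omega),
                  PySem.Dict.get?_insert_self,
                  if_pos ⟨List.mem_cons_self, by simp; omega⟩]
              simp [pvLC]
            · by_cases hmem : o ∈ b :: t'
              · have hgt : a < o := by have := hge' o hmem; omega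
                have htake : ((ch :: tl).take (o - a).toNat) = ch :: tl.take (o - a - 1).toNat := by
                  have h1 : (o - a).toNat = (o - a - 1).toNat + 1 := by omega
                  rw [h1, List.take_succ_cons]
                by_cases hle : o ≤ a + 1 + (tl.length : Int)
                · rw [if_pos ⟨hmem, hle⟩,
                      if_pos ⟨List.mem_cons_of_mem a hmem, by simp; omega⟩, htake]
                  simp [pvLC, hch]
                  have hidx : (o - (a + 1)).toNat = (o - a).toNat - 1 := by omega
                  rw [hidx]
                · rw [if_neg (by rintro ⟨_, h⟩; exact hle h),
                      PySem.Dict.get?_insert_of_ne _ _ ho,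
                      if_neg (by rintro ⟨_, h⟩; simp at h; omega)]
              · rw [if_neg (by rintro ⟨h, _⟩; exact hmem h),
                    PySem.Dict.get?_insert_of_ne _ _ ho,
                    if_neg (by rintro ⟨h, _⟩; rcases List.mem_cons.mp h with h | h
                               exacts [absurd h ho, absurd h hmem])]
      · rw [pvAWhile_no idx l c a t m ha]
        dsimp only
        have hga : idx < a := by have := hge a List.mem_cons_self; omega
        have hge' : ∀ x ∈ a :: t, idx + 1 ≤ x := fun x hx => by
          rcases List.mem_cons.mp hx with h | h
          · omega
          · have := hpc.1 x h; omega
        by_cases hch : ch = '\n'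
        · rw [if_pos hch, ih _ _ _ _ _ hs hge']
          by_cases hmem : o ∈ a :: t
          · have hgt : idx < o := by have := hge' o hmem; omega
            have htake : ((ch :: tl).take (o - idx).toNat) = ch :: tl.take (o - idx - 1).toNat := by
              have h1 : (o - idx).toNat = (o - idx - 1).toNat + 1 := by omega
              rw [h1, List.take_succ_cons]
            by_cases hle : o ≤ idx + 1 + (tl.length : Int)
            · rw [if_pos ⟨hmem, hle⟩, if_pos ⟨hmem, by simp; omega⟩, htake]
              simp [pvLC, hch]
              have hidx : (o - (idx + 1)).toNat = (o - idx).toNat - 1 := by omega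
              rw [hidx]
            · rw [if_neg (by rintro ⟨_, h⟩; exact hle h),
                  if_neg (by rintro ⟨_, h⟩; simp at h; omega)]
          · rw [if_neg (by rintro ⟨h, _⟩; exact hmem h),
                if_neg (by rintro ⟨h, _⟩; exact hmem h)]
        · rw [if_neg hch, ih _ _ _ _ _ hs hge']
          by_cases hmem : o ∈ a :: t
          · have hgt : idx < o := by have := hge' o hmem; omega
            have htake : ((ch :: tl).take (o - idx).toNat) = ch :: tl.take (o - idx - 1).toNat := by
              have h1 : (o - idx).toNat = (o - idx - 1).toNat + 1 := by omega
              rw [h1, List.take_succ_cons]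
            by_cases hle : o ≤ idx + 1 + (tl.length : Int)
            · rw [if_pos ⟨hmem, hle⟩, if_pos ⟨hmem, by simp; omega⟩, htake]
              simp [pvLC, hch]
              have hidx : (o - (idx + 1)).toNat = (o - idx).toNat - 1 := by omega
              rw [hidx]
            · rw [if_neg (by rintro ⟨_, h⟩; exact hle h),
                  if_neg (by rintro ⟨_, h⟩; simp at h; omega)]
          · rw [if_neg (by rintro ⟨h, _⟩; exact hmem h),
                if_neg (by rintro ⟨h, _⟩; exact hmem h)]

-- a head smaller than idx blocks the whole loop
theorem pvALoop_stuck (rest : List Char) (idx l c : Int) (o₀ : Int) (t : List Int)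
    (m : PySem.Dict Int String) (h : o₀ < idx) :
    pvALoop rest idx l c (o₀ :: t) m = m := by
  induction rest generalizing idx l c with
  | nil => rw [pvALoop_nil, pvAWhile_no idx l c o₀ t m (by omega)]
  | cons ch tl ih =>
    rw [pvALoop_cons, pvAWhile_no idx l c o₀ t m (by omega)]
    dsimp only
    split_ifs <;> exact ih (idx + 1) _ _ (by omega)

-- membership / nodup of the offset set A builds
theorem pv_mem_built (spans : List (Int × Int × String)) (st : PySem.Set Int) (o : Int) :
    o ∈ spans.foldl (fun st sp => PySem.Set.add (PySem.Set.add st sp.1) sp.2.1) st ↔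
      o ∈ st ∨ ∃ sp ∈ spans, o = sp.1 ∨ o = sp.2.1 := by
  induction spans generalizing st with
  | nil => simp
  | cons sp tl ih =>
    simp only [List.foldl_cons, ih, PySem.Set.mem_add, List.mem_cons]
    constructor
    · rintro (((h | h) | h) | ⟨x, hx, h⟩)
      · exact Or.inl h
      · exact Or.inr ⟨sp, Or.inl rfl, Or.inl h⟩
      · exact Or.inr ⟨sp, Or.inl rfl, Or.inr h⟩
      · exact Or.inr ⟨x, Or.inr hx, h⟩
    · rintro (h | ⟨x, (rfl | hx), h⟩)
      · exact Or.inl (Or.inl (Or.inl h))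
      · rcases h with h | h
        · exact Or.inl (Or.inl (Or.inr h))
        · exact Or.inl (Or.inr h)
      · exact Or.inr ⟨x, hx, h⟩

theorem pv_nodup_built (spans : List (Int × Int × String)) (st : PySem.Set Int)
    (h : st.Nodup) :
    (spans.foldl (fun st sp => PySem.Set.add (PySem.Set.add st sp.1) sp.2.1) st).Nodup := by
  induction spans generalizing st with
  | nil => exact h
  | cons sp tl ih =>
    exact ih _ (PySem.Set.nodup_add _ _ (PySem.Set.nodup_add _ _ h))

-- B's fold appends exactly the in-range spans
theorem pvB_fold (cs : List Char) (spans : List (Int × Int × String))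
    (acc : List (String × String)) :
    spans.foldl (fun acc sp =>
      if 0 ≤ sp.1 ∧ sp.1 ≤ (cs.length : Int) ∧ 0 ≤ sp.2.1 ∧ sp.2.1 ≤ (cs.length : Int) then
        acc ++ [(pvConv cs sp.1, pvConv cs sp.2.1)]
      else acc) acc =
    acc ++ spans.foldl (fun acc sp =>
      if 0 ≤ sp.1 ∧ sp.1 ≤ (cs.length : Int) ∧ 0 ≤ sp.2.1 ∧ sp.2.1 ≤ (cs.length : Int) then
        acc ++ [(pvConv cs sp.1, pvConv cs sp.2.1)]
      else acc) [] := by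
  induction spans generalizing acc with
  | nil => simp
  | cons sp tl ih =>
    simp only [List.foldl_cons]
    rw [ih]
    conv_rhs => rw [ih]
    split_ifs <;> simp

-- B's fold returns acc unchanged when every span fails the range test
theorem pvB_fold_nil (cs : List Char) (spans : List (Int × Int × String))
    (acc : List (String × String))
    (h : ∀ sp ∈ spans, ¬ (0 ≤ sp.1 ∧ sp.1 ≤ (cs.length : Int) ∧
                          0 ≤ sp.2.1 ∧ sp.2.1 ≤ (cs.length : Int))) :
    spans.foldl (fun acc sp =>
      if 0 ≤ sp.1 ∧ sp.1 ≤ (cs.length : Int) ∧ 0 ≤ sp.2.1 ∧ sp.2.1 ≤ (cs.length : Int) then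
        acc ++ [(pvConv cs sp.1, pvConv cs sp.2.1)]
      else acc) acc = acc := by
  induction spans generalizing acc with
  | nil => rfl
  | cons sp tl ih =>
    simp only [List.foldl_cons]
    rw [if_neg (h sp List.mem_cons_self)]
    exact ih acc (fun x hx => h x (List.mem_cons_of_mem sp hx))

-- B's fold produces a nonempty result when some span passes the range test
theorem pvB_fold_ne (cs : List Char) (spans : List (Int × Int × String))
    (acc : List (String × String))
    (h : ∃ sp ∈ spans, 0 ≤ sp.1 ∧ sp.1 ≤ (cs.length : Int) ∧
                       0 ≤ sp.2.1 ∧ sp.2.1 ≤ (cs.length : Int)) :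
    spans.foldl (fun acc sp =>
      if 0 ≤ sp.1 ∧ sp.1 ≤ (cs.length : Int) ∧ 0 ≤ sp.2.1 ∧ sp.2.1 ≤ (cs.length : Int) then
        acc ++ [(pvConv cs sp.1, pvConv cs sp.2.1)]
      else acc) acc ≠ [] := by
  induction spans generalizing acc with
  | nil => obtain ⟨sp, hsp, _⟩ := h; cases hsp
  | cons sp tl ih =>
    simp only [List.foldl_cons]
    obtain ⟨w, hw, hcond⟩ := h
    rcases List.mem_cons.mp hw with rfl | hwtl
    · rw [if_pos hcond, pvB_fold cs tl]
      simp
    · split_ifs <;> exact ih _ ⟨w, hwtl, hcond⟩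

-- the empty dict looks up to none
theorem pv_get_empty (o : Int) : (PySem.Dict.empty : PySem.Dict Int String).get? o = none := by
  rfl

-- A's result fold returns acc when the map is empty
theorem pv_foldA_empty (spans : List (Int × Int × String)) (acc : List (String × String)) :
    spans.foldl (fun acc sp =>
      match (PySem.Dict.empty : PySem.Dict Int String).get? sp.1,
            (PySem.Dict.empty : PySem.Dict Int String).get? sp.2.1 with
      | some a, some b => acc ++ [(a, b)]
      | _, _ => acc) acc = acc := by
  induction spans generalizing acc with
  | nil => rfl
  | cons sp tl ih =>
    simp only [List.foldl_cons, pv_get_empty]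
    exact ih acc

-- A's and B's result folds agree span by span once the map is characterized
theorem pv_fold_eq (cs : List Char) (m : PySem.Dict Int String)
    (spans : List (Int × Int × String)) (acc : List (String × String))
    (hget : ∀ o : Int, (∃ sp ∈ spans, o = sp.1 ∨ o = sp.2.1) →
      m.get? o = if 0 ≤ o ∧ o ≤ (cs.length : Int) then some (pvConv cs o) else none) :
    spans.foldl (fun acc sp =>
      match m.get? sp.1, m.get? sp.2.1 with
      | some a, some b => acc ++ [(a, b)]
      | _, _ => acc) acc =
    spans.foldl (fun acc sp =>
      if 0 ≤ sp.1 ∧ sp.1 ≤ (cs.length : Int) ∧ 0 ≤ sp.2.1 ∧ sp.2.1 ≤ (cs.length : Int) then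
        acc ++ [(pvConv cs sp.1, pvConv cs sp.2.1)]
      else acc) acc := by
  induction spans generalizing acc with
  | nil => rfl
  | cons sp tl ih =>
    simp only [List.foldl_cons]
    have h1 := hget sp.1 ⟨sp, List.mem_cons_self, Or.inl rfl⟩
    have h2 := hget sp.2.1 ⟨sp, List.mem_cons_self, Or.inr rfl⟩
    have htl : ∀ o : Int, (∃ x ∈ tl, o = x.1 ∨ o = x.2.1) →
        m.get? o = if 0 ≤ o ∧ o ≤ (cs.length : Int) then some (pvConv cs o) else none :=
      fun o ⟨x, hx, hox⟩ => hget o ⟨x, List.mem_cons_of_mem sp hx, hox⟩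
    by_cases c1 : 0 ≤ sp.1 ∧ sp.1 ≤ (cs.length : Int)
    · rw [if_pos c1] at h1
      by_cases c2 : 0 ≤ sp.2.1 ∧ sp.2.1 ≤ (cs.length : Int)
      · rw [if_pos c2] at h2
        rw [h1, h2, if_pos ⟨c1.1, c1.2, c2.1, c2.2⟩]
        exact ih _ htl
      · rw [if_neg c2] at h2
        rw [h1, h2, if_neg (by rintro ⟨a, b, c, d⟩; exact c2 ⟨c, d⟩)]
        exact ih _ htl
    · rw [if_neg c1] at h1
      rw [h1, if_neg (by rintro ⟨a, b, _, _⟩; exact c1 ⟨a, b⟩)]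
      exact ih _ htl

theorem pv_main (text : String) (spans : List (Int × Int × String))
    (hneg : ∀ sp ∈ spans, 0 ≤ sp.1 ∧ 0 ≤ sp.2.1) :
    charoffsets_to_linecol_py text spans = charoffsets_to_linecol_py_alt text spans := by
  cases spans with
  | nil => rfl
  | cons sp0 tl0 =>
    simp only [charoffsets_to_linecol_py, charoffsets_to_linecol_py_alt]
    set cs := text.toList with hcs
    set built := (sp0 :: tl0).foldl
        (fun st sp => PySem.Set.add (PySem.Set.add st sp.1) sp.2.1) PySem.Set.empty with hbuilt
    set offs := PySem.List.sorted built (fun x => x) false with hoffs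
    have hnd_built : built.Nodup := by
      rw [hbuilt]
      exact pv_nodup_built _ _ List.nodup_nil
    have hperm : offs.Perm built := PySem.List.sorted_perm built (fun x => x) false
    have hnd : offs.Nodup := hperm.nodup_iff.mpr hnd_built
    have hle : offs.Pairwise (fun a b => a ≤ b) := PySem.List.sorted_pairwise built (fun x => x)
    have hlt : offs.Pairwise (· < ·) :=
      (hle.and hnd).imp (fun h => lt_of_le_of_ne h.1 h.2)
    have hmemoffs : ∀ o : Int, o ∈ offs ↔ (∃ sp ∈ sp0 :: tl0, o = sp.1 ∨ o = sp.2.1) := by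
      intro o
      rw [hoffs, PySem.List.mem_sorted, hbuilt, pv_mem_built]
      simp
    have hge : ∀ x ∈ offs, (0 : Int) ≤ x := by
      intro x hx
      obtain ⟨sp, hsp, hox⟩ := (hmemoffs x).mp hx
      have := hneg sp hsp
      rcases hox with rfl | rfl <;> omega
    apply pv_fold_eq
    intro o ⟨sp, hsp, hox⟩
    have ho0 : 0 ≤ o := by
      have := hneg sp hsp
      rcases hox with rfl | rfl <;> omega
    have hmem : o ∈ offs := (hmemoffs o).mpr ⟨sp, hsp, hox⟩
    rw [pvALoop_get cs 0 1 0 offs PySem.Dict.empty o hlt (fun x hx => hge x hx)]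
    by_cases hon : o ≤ (cs.length : Int)
    · rw [if_pos ⟨hmem, by omega⟩, if_pos ⟨ho0, hon⟩, pvConv_eq cs o ho0 hon]
      have : o - 0 = o := by omega
      rw [this]
    · rw [if_neg (by rintro ⟨_, hℓ⟩; omega), if_neg (by rintro ⟨_, hℓ⟩; omega),
          pv_get_empty]

theorem pv_negcase (text : String) (spans : List (Int × Int × String))
    (hneg : ∃ sp ∈ spans, sp.1 < 0 ∨ sp.2.1 < 0) :
    charoffsets_to_linecol_py text spans = [] := by
  cases spans with
  | nil => rfl
  | cons sp0 tl0 =>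
    simp only [charoffsets_to_linecol_py]
    set cs := text.toList with hcs
    set built := (sp0 :: tl0).foldl
        (fun st sp => PySem.Set.add (PySem.Set.add st sp.1) sp.2.1) PySem.Set.empty with hbuilt
    obtain ⟨sp, hsp, hspneg⟩ := hneg
    have hxb : ∃ x, x ∈ built ∧ x < 0 := by
      rcases hspneg with h | h
      · exact ⟨sp.1, by rw [hbuilt, pv_mem_built]; exact Or.inr ⟨sp, hsp, Or.inl rfl⟩, h⟩
      · exact ⟨sp.2.1, by rw [hbuilt, pv_mem_built]; exact Or.inr ⟨sp, hsp, Or.inr rfl⟩, h⟩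
    obtain ⟨x, hxmem, hxneg⟩ := hxb
    have hxoffs : x ∈ PySem.List.sorted built (fun x => x) false :=
      (PySem.List.mem_sorted built (fun x => x) false x).mpr hxmem
    cases hsort : PySem.List.sorted built (fun x => x) false with
    | nil => rw [hsort] at hxoffs; cases hxoffs
    | cons h0 t =>
      have hh0 : h0 ≤ x := PySem.List.key_head_sorted_le built (fun x => x) hsort x hxmem
      rw [pvALoop_stuck cs 0 1 0 h0 t PySem.Dict.empty (by omega)]
      exact pv_foldA_empty (sp0 :: tl0) []

theorem pv_b_empty (text : String) (spans : List (Int × Int × String))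
    (h : ∀ sp ∈ spans, ¬ (0 ≤ sp.1 ∧ sp.1 ≤ (text.toList.length : Int) ∧
                          0 ≤ sp.2.1 ∧ sp.2.1 ≤ (text.toList.length : Int))) :
    charoffsets_to_linecol_py_alt text spans = [] := by
  cases spans with
  | nil => rfl
  | cons sp0 tl0 =>
    simp only [charoffsets_to_linecol_py_alt]
    exact pvB_fold_nil text.toList (sp0 :: tl0) [] h

theorem pv_b_nonempty (text : String) (spans : List (Int × Int × String))
    (h : ∃ sp ∈ spans, 0 ≤ sp.1 ∧ sp.1 ≤ (text.toList.length : Int) ∧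
                       0 ≤ sp.2.1 ∧ sp.2.1 ≤ (text.toList.length : Int)) :
    charoffsets_to_linecol_py_alt text spans ≠ [] := by
  cases spans with
  | nil => obtain ⟨sp, hsp, _⟩ := h; cases hsp
  | cons sp0 tl0 =>
    simp only [charoffsets_to_linecol_py_alt]
    exact pvB_fold_ne text.toList (sp0 :: tl0) [] h

-- ===== VERDICT (by name: the statement is the Claim_ definition above) =====
theorem charoffsets_to_linecol_py_spec : Claim_unchanged_charoffsets_to_linecol_py := by
  intro text spans _ hD
  unfold D_charoffsets_to_linecol_py at hD
  by_cases hneg : ∀ sp ∈ spans, 0 ≤ sp.1 ∧ 0 ≤ sp.2.1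
  · exact pv_main text spans hneg
  · have hnegx : ∃ sp ∈ spans, sp.1 < 0 ∨ sp.2.1 < 0 := by
      by_contra hc
      refine hneg (fun sp hsp => ?_)
      have : ¬ (sp.1 < 0 ∨ sp.2.1 < 0) := fun h => hc ⟨sp, hsp, h⟩
      omega
    rw [pv_negcase text spans hnegx, pv_b_empty text spans]
    exact fun sp hsp hc => hD ⟨hnegx, ⟨sp, hsp, hc⟩⟩

theorem charoffsets_to_linecol_py_changed : Claim_changed_charoffsets_to_linecol_py := by
  unfold Claim_changed_charoffsets_to_linecol_py; decide

theorem charoffsets_to_linecol_py_tight : Claim_exact_charoffsets_to_linecol_py := by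
  intro text spans _ hD
  obtain ⟨hneg, hval⟩ := hD
  rw [pv_negcase text spans hneg]
  exact fun h => pv_b_nonempty text spans hval h.symm
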